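-- pv_equiv track=rewrite | github.com/OussemaTurki0/PFE-RayBand | mobile/src/components/modals/AI-Chat.py | is_ungrounded_answer
-- ===== SOURCE A (Python) =====
-- def is_ungrounded_answer(answer: str) -> bool:
--     triggers = [
--         "i don't know",
--         "unable to answer",
--         "not mentioned",
--         "does not mention",
--         "no information",
--         "not provided",
--         "cannot find",
--         "unclear"
--     ]
--     a = answer.lower()
--     return any(t in a for t in triggers)
-- ===== SOURCE B (Python) =====
-- _TRIGGERS = ("i don't know", "unable to answer", "not mentioned",
--              "does not mention", "no information", "not provided",
--              "cannot find", "unclear")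
--
-- def is_ungrounded_answer(answer: str) -> bool:
--     text = answer.lower()
--     for i in range(len(text) + 1):
--         if any(text.startswith(t, i) for t in _TRIGGERS):
--             return True
--     return False
-- ===== Notes on version B (the rewrite author's own statement) =====
-- stated objective: alternative
-- what changed: B makes a single left-to-right scan over the lowercased answer, at each position testing whether any trigger starts there, instead of A's eight independent substring searches of the whole answer.
import Mathlib
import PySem

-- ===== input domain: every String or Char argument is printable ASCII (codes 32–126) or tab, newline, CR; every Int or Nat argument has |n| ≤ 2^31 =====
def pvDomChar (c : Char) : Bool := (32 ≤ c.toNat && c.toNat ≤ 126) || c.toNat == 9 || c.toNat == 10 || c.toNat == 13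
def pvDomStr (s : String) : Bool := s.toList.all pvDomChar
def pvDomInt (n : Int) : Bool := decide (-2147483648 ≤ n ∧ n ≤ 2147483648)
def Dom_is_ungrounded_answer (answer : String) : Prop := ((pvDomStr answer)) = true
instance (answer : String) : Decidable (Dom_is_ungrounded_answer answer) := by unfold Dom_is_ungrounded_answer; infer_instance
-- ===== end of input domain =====

-- B replaces eight independent substring searches by one positional scan (alternative decomposition, return value identical).
-- ===== PORT A =====
-- A: lowercase the answer, then `any(t in a for t in triggers)` — one substring search per trigger.
def pvTriggersA : List String :=
  ["i don't know", "unable to answer", "not mentioned", "does not mention",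
   "no information", "not provided", "cannot find", "unclear"]

def is_ungrounded_answer (answer : String) : Bool :=
  let a := PySem.Str.lower answer
  pvTriggersA.any (fun t => PySem.Str.isIn t a)

-- ===== PORT B =====
-- B: a single left-to-right scan of the lowercased answer; at each position
-- (including the empty final suffix, like range(len(a)+1)) test whether any trigger starts there.
def pvTriggersB : List String :=
  ["i don't know", "unable to answer", "not mentioned", "does not mention",
   "no information", "not provided", "cannot find", "unclear"]

def pvScan (s : List Char) : Bool :=
  match s with
  | [] => pvTriggersB.any (fun t => t.toList.isPrefixOf [])
  | _ :: rest => pvTriggersB.any (fun t => t.toList.isPrefixOf s) || pvScan rest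

def is_ungrounded_answer_alt (answer : String) : Bool :=
  pvScan (PySem.Str.lower answer).toList

def Spec_is_ungrounded_answer (answer : String) (out : Bool) : Prop := out = is_ungrounded_answer_alt answer
instance (answer : String) (out : Bool) : Decidable (Spec_is_ungrounded_answer answer out) := by unfold Spec_is_ungrounded_answer; infer_instance

-- ===== CLAIM (what is proved, stated in full; the proofs are below) =====
def Claim_equal_is_ungrounded_answer : Prop := ∀ (answer : String), Dom_is_ungrounded_answer answer → Spec_is_ungrounded_answer answer (is_ungrounded_answer answer)

-- ===== LEMMAS AND PROOFS =====

-- ===== VERDICT (by name: the statement is the Claim_ definition above) =====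
lemma pvScan_iff (s : List Char) :
    pvScan s = true ↔ ∃ t ∈ pvTriggersB, ∃ j, t.toList <+: s.drop j := by
  induction s with
  | nil =>
    simp [pvScan, List.any_eq_true, List.isPrefixOf_iff_prefix]
  | cons c rest ih =>
    simp only [pvScan, Bool.or_eq_true, List.any_eq_true, List.isPrefixOf_iff_prefix, ih]
    constructor
    · rintro (⟨t, ht, hp⟩ | ⟨t, ht, j, hp⟩)
      · exact ⟨t, ht, 0, by simpa using hp⟩
      · exact ⟨t, ht, j + 1, by simpa using hp⟩
    · rintro ⟨t, ht, j, hp⟩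
      cases j with
      | zero => exact Or.inl ⟨t, ht, by simpa using hp⟩
      | succ j => exact Or.inr ⟨t, ht, j, by simpa using hp⟩

theorem is_ungrounded_answer_spec : Claim_equal_is_ungrounded_answer := by
  intro answer _
  unfold Spec_is_ungrounded_answer is_ungrounded_answer is_ungrounded_answer_alt
  show (pvTriggersA.any fun t => PySem.Str.isIn t (PySem.Str.lower answer))
      = pvScan (PySem.Str.lower answer).toList
  have hT : pvTriggersA = pvTriggersB := rfl
  rw [hT]
  set a := PySem.Str.lower answer with ha
  have key : ∀ t : String, PySem.Str.isIn t a = true ↔ ∃ j, t.toList <+: a.toList.drop j := by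
    intro t
    rw [PySem.Str.isIn_iff_infix, ← PySem.Chars.isIn_iff_infix,
      ← PySem.Chars.exists_prefix_drop_iff_isIn]
  rcases Bool.eq_false_or_eq_true (pvScan a.toList) with h | h <;> rw [h]
  · rw [List.any_eq_true]
    obtain ⟨t, ht, j, hp⟩ := (pvScan_iff a.toList).1 h
    exact ⟨t, ht, (key t).2 ⟨j, hp⟩⟩
  · rw [List.any_eq_false]
    intro t ht hin
    obtain ⟨j, hp⟩ := (key t).1 hin
    have := (pvScan_iff a.toList).2 ⟨t, ht, j, hp⟩
    rw [h] at this
    exact Bool.false_ne_true this
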